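-- pv_equiv track=rewrite | github.com/Ranjankumar666/interview_questions | is_almost_palindrome.py | isPalindromeIgnore
-- ===== SOURCE A (Python) =====
-- def isPalindromeIgnore(s, k):
--     n = len(s)
--     i = 0
--     j = n- 1
--
--     while i < j :
--         if i == k :
--           i += 1
--           continue
--         if j == k:
--             j -= 1
--             continue
--
--         if s[i] != s[j]:
--             return False
--         i+=1
--         j-=1
--     return True
-- ===== SOURCE B (Python) =====
-- def isPalindromeIgnore(s, k):
--     # Build the sequence with index k removed (full sequence when k is out of
--     # range, matching A's behaviour there) and compare it with its reverse.
--     t = s[:k] + s[k+1:] if 0 <= k < len(s) else s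
--     return t == t[::-1]
-- ===== Notes on version B (the rewrite author's own statement) =====
-- stated objective: simpler
-- what changed: Replaced the in-place two-pointer skip-and-scan loop with a construct-then-compare: build the string with index k removed (or the whole string for out-of-range k) and compare it to its reverse.
import Mathlib
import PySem

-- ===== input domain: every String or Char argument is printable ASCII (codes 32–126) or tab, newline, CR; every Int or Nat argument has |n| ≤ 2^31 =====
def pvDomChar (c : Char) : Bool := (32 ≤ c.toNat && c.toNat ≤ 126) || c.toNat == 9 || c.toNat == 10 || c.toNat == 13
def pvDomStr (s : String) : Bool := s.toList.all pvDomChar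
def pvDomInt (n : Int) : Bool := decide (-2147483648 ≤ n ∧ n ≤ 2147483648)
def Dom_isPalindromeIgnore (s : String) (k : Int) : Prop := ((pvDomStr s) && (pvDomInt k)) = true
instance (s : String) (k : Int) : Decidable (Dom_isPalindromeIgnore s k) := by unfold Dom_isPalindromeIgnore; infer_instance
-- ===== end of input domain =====

-- B replaces A's two-pointer skip-and-scan with "remove index k, then compare with the
-- reverse" (objective: simpler); proved to return the same Bool on every input.

-- ===== PORT A =====
-- the while loop of A, step for step; in every reachable state 0 ≤ i < j ≤ len − 1,
-- so the pyGet? lookups are exact (Python never raises here)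
def pvLoopA (l : List Char) (k i j : Int) : Bool :=
  if _h : i < j then
    if i = k then pvLoopA l k (i + 1) j
    else if j = k then pvLoopA l k i (j - 1)
    else if PySem.List.pyGet? l i ≠ PySem.List.pyGet? l j then false
    else pvLoopA l k (i + 1) (j - 1)
  else true
termination_by (j - i).toNat
decreasing_by all_goals omega

def isPalindromeIgnore (s : String) (k : Int) : Bool :=
  pvLoopA s.toList k 0 (PySem.List.len s.toList - 1)

-- ===== PORT B =====
-- t = s[:k] + s[k+1:] if 0 <= k < len(s) else s; return t == t[::-1]
-- (t[::-1] ported as List.reverse, cf. PySem.List.slice?_none_none_neg_one)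
def isPalindromeIgnore_alt (s : String) (k : Int) : Bool :=
  let l := s.toList
  let t := if 0 ≤ k ∧ k < PySem.List.len l then
             PySem.List.slice l none (some k) ++ PySem.List.slice l (some (k + 1)) none
           else l
  t == t.reverse

-- ===== PRECONDITION & SPEC =====
def Spec_isPalindromeIgnore (s : String) (k : Int) (out : Bool) : Prop := out = isPalindromeIgnore_alt s k
instance (s : String) (k : Int) (out : Bool) : Decidable (Spec_isPalindromeIgnore s k out) := by unfold Spec_isPalindromeIgnore; infer_instance

-- ===== CLAIM (what is proved, stated in full; the proofs are below) =====
def Claim_equal_isPalindromeIgnore : Prop := ∀ (s : String) (k : Int), Dom_isPalindromeIgnore s k → Spec_isPalindromeIgnore s k (isPalindromeIgnore s k)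

-- ===== LEMMAS AND PROOFS =====

-- plain two-pointer palindrome scan (no skip index): the common yardstick both ports reduce to
def pvPal2 (t : List Char) (p q : Int) : Bool :=
  if _h : p < q then
    if PySem.List.pyGet? t p ≠ PySem.List.pyGet? t q then false
    else pvPal2 t (p + 1) (q - 1)
  else true
termination_by (q - p).toNat
decreasing_by omega

-- "every mirrored pair of positions in the window [p, q] agrees"
def pvPairs (t : List Char) (p q : Int) : Prop :=
  ∀ a : Nat, p ≤ (a : Int) → (a : Int) < p + q - a → t[a]? = t[(p + q - a).toNat]?

theorem pvPal2_iff (t : List Char) (p q : Int) (hp : 0 ≤ p) (hq : q < t.length) :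
    pvPal2 t p q = true ↔ pvPairs t p q := by
  generalize hm : (q - p).toNat = m
  induction m using Nat.strong_induction_on generalizing p q with
  | _ m ih => ?_
  by_cases hpq : p < q
  case neg =>
    rw [pvPal2, dif_neg hpq]
    constructor
    · intro _ a ha hlt; omega
    · intro _; rfl
  case pos =>
    rw [pvPal2, dif_pos hpq]
    have hgp : PySem.List.pyGet? t p = t[p.toNat]? := PySem.List.pyGet?_of_nonneg _ hp
    have hgq : PySem.List.pyGet? t q = t[q.toNat]? := PySem.List.pyGet?_of_nonneg _ (by omega)
    by_cases hne : PySem.List.pyGet? t p ≠ PySem.List.pyGet? t q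
    · rw [if_pos hne]
      constructor
      · intro h; exact absurd h (by simp)
      · intro h
        exact absurd (by
          have := h p.toNat (by omega) (by omega)
          rw [hgp, hgq]
          convert this using 3
          omega) hne
    · rw [if_neg hne]
      rw [not_not] at hne
      rw [ih ((q - 1) - (p + 1)).toNat (by omega) (p + 1) (q - 1) (by omega) (by omega) rfl]
      constructor
      · intro h a ha hlt
        by_cases hap : (a : Int) = p
        · rw [hgp, hgq] at hne
          have h1 : a = p.toNat := by omega
          subst h1
          have h2 : (p + q - (↑p.toNat : Int)).toNat = q.toNat := by omega
          rw [h2]; exact hne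
        · have := h a (by omega) (by omega)
          convert this using 3
          omega
      · intro h a ha hlt
        have := h a (by omega) (by omega)
        convert this using 3
        omega

theorem pvRev_iff (t : List Char) : t = t.reverse ↔ pvPairs t 0 ((t.length : Int) - 1) := by
  constructor
  · intro h a ha hlt
    have haN : a < t.length := by omega
    have : t.reverse[a]? = t[t.length - 1 - a]? := List.getElem?_reverse haN
    rw [← h] at this
    rw [this]
    congr 1
    omega
  · intro h
    apply List.ext_getElem?
    intro a
    by_cases haN : a < t.length
    · rw [List.getElem?_reverse haN]
      rcases lt_trichotomy a (t.length - 1 - a) with hlt | heq | hgt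
      · have := h a (by omega) (by omega)
        convert this using 3
        omega
      · have h2 : t.length - 1 - a = a := by omega
        rw [h2]
      · have := h (t.length - 1 - a) (by omega) (by omega)
        have h2 : (0 + ((t.length : Int) - 1) - ↑(t.length - 1 - a)).toNat = a := by omega
        rw [h2] at this
        exact this.symm
    · rw [List.getElem?_eq_none (by omega), List.getElem?_eq_none (by simp; omega)]

theorem pvPal2_eq_beq (t : List Char) : pvPal2 t 0 ((t.length : Int) - 1) = (t == t.reverse) := by
  rw [Bool.eq_iff_iff, pvPal2_iff t 0 ((t.length : Int) - 1) le_rfl (by omega), ← pvRev_iff t]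
  exact (beq_iff_eq).symm

-- out-of-range k: A's skip branches never fire, the loop is the plain scan
theorem pvLoopA_out (l : List Char) (k i j : Int) (hk : k < 0 ∨ (l.length : Int) ≤ k)
    (hi : 0 ≤ i) (hj : j < l.length) : pvLoopA l k i j = pvPal2 l i j := by
  generalize hm : (j - i).toNat = m
  induction m using Nat.strong_induction_on generalizing i j with
  | _ m ih => ?_
  by_cases hpq : i < j
  case neg => rw [pvLoopA, dif_neg hpq, pvPal2, dif_neg hpq]
  case pos =>
    rw [pvLoopA, dif_pos hpq, pvPal2, dif_pos hpq]
    rw [if_neg (by omega), if_neg (by omega)]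
    by_cases hne : PySem.List.pyGet? l i ≠ PySem.List.pyGet? l j
    · rw [if_pos hne, if_pos hne]
    · rw [if_neg hne, if_neg hne]
      exact ih ((j - 1) - (i + 1)).toNat (by omega) (i + 1) (j - 1) (by omega) (by omega) rfl

-- in-range k: A's loop is the plain scan over l with index k removed,
-- with the pointers shifted past position k
theorem pvLoopA_in (l : List Char) (k i j : Int) (hk0 : 0 ≤ k) (hkn : k < l.length)
    (hi : 0 ≤ i) (hj : j < l.length) :
    pvLoopA l k i j = pvPal2 (l.take k.toNat ++ l.drop (k.toNat + 1))
      (if i ≤ k then i else i - 1) (if j < k then j else j - 1) := by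
  set t := l.take k.toNat ++ l.drop (k.toNat + 1) with ht
  have hlen : t.length = l.length - 1 := by
    rw [ht]; simp [List.length_take, List.length_drop]; omega
  -- index correspondence: for x ≠ k in range, l[x] appears in t at the shifted position
  have hget : ∀ x : Int, 0 ≤ x → x < l.length → x ≠ k →
      PySem.List.pyGet? t (if x < k then x else x - 1) = PySem.List.pyGet? l x := by
    intro x hx0 hxn hxk
    by_cases hxlt : x < k
    · rw [if_pos hxlt, PySem.List.pyGet?_of_nonneg _ hx0, PySem.List.pyGet?_of_nonneg _ hx0, ht]
      rw [List.getElem?_append_left (by simp [List.length_take]; omega)]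
      rw [List.getElem?_take_of_lt (by omega)]
    · rw [if_neg hxlt, PySem.List.pyGet?_of_nonneg _ (by omega),
        PySem.List.pyGet?_of_nonneg _ hx0, ht]
      rw [List.getElem?_append_right (by simp [List.length_take]; omega)]
      rw [List.getElem?_drop]
      congr 1
      simp [List.length_take]
      omega
  generalize hm : (j - i).toNat = m
  induction m using Nat.strong_induction_on generalizing i j with
  | _ m ih => ?_
  by_cases hpq : i < j
  case neg => rw [pvLoopA, dif_neg hpq, pvPal2, dif_neg (by split_ifs <;> omega)]
  case pos =>
    rw [pvLoopA, dif_pos hpq]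
    by_cases hik : i = k
    · rw [if_pos hik]
      rw [ih (j - (i + 1)).toNat (by omega) (i + 1) j (by omega) hj rfl]
      congr 1
      omega
    · rw [if_neg hik]
      by_cases hjk : j = k
      · rw [if_pos hjk]
        rw [ih ((j - 1) - i).toNat (by omega) i (j - 1) hi (by omega) rfl]
        congr 1
        omega
      · rw [if_neg hjk]
        have hcond : (if i ≤ k then i else i - 1) < (if j < k then j else j - 1) := by
          split_ifs <;> omega
        rw [pvPal2, dif_pos hcond]
        have hφ : (if i ≤ k then i else i - 1) = (if i < k then i else i - 1) := by
          split_ifs <;> omega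
        rw [hφ, hget i hi (by omega) hik, hget j (by omega) hj hjk]
        by_cases hne : PySem.List.pyGet? l i ≠ PySem.List.pyGet? l j
        · rw [if_pos hne, if_pos hne]
        · rw [if_neg hne, if_neg hne]
          rw [ih ((j - 1) - (i + 1)).toNat (by omega) (i + 1) (j - 1) (by omega) (by omega) rfl]
          congr 1 <;> omega

-- ===== VERDICT (by name: the statement is the Claim_ definition above) =====
theorem isPalindromeIgnore_spec : Claim_equal_isPalindromeIgnore := by
  intro s k _
  unfold Spec_isPalindromeIgnore isPalindromeIgnore isPalindromeIgnore_alt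
  set l := s.toList with hl
  simp only [PySem.List.len_eq]
  by_cases hk : 0 ≤ k ∧ k < (l.length : Int)
  · rw [if_pos hk]
    rw [PySem.List.slice_to l hk.1, PySem.List.slice_from l (by omega)]
    have hk1 : (k + 1).toNat = k.toNat + 1 := by omega
    rw [hk1]
    set t := l.take k.toNat ++ l.drop (k.toNat + 1) with ht
    have hn1 : 1 ≤ l.length := by omega
    have hlen : t.length = l.length - 1 := by
      rw [ht]; simp [List.length_take, List.length_drop]; omega
    rw [pvLoopA_in l k 0 ((l.length : Int) - 1) hk.1 hk.2 le_rfl (by omega)]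
    rw [if_pos hk.1, if_neg (by omega)]
    rw [← pvPal2_eq_beq t]
    congr 1
    omega
  · rw [if_neg hk]
    rw [pvLoopA_out l k 0 ((l.length : Int) - 1) (by omega) le_rfl (by omega)]
    exact pvPal2_eq_beq l
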